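-- pv_equiv track=rewrite | github.com/beethoven-97/Optical-character-recognition | data_load.py | truncate_label
-- ===== SOURCE A (Python) =====
-- def truncate_label(text, maxtextlen):
--     cost = 0
--     for i in range(len(text)):
--         if i > 0 and text[i - 1] == text[i]:
--             cost += 2
--         else:
--             cost += 1
--         if cost > maxtextlen:
--             return text[:i]
--     return text
-- ===== SOURCE B (Python) =====
-- def truncate_label(text, maxtextlen):
--     # CTC cost table: first of a run costs 1, a repeat costs 2; prefix sums,
--     # then a binary search for the first prefix cost exceeding maxtextlen.
--     prefix = []
--     total = 0
--     for i in range(len(text)):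
--         total += 1 if i == 0 or text[i - 1] != text[i] else 2
--         prefix.append(total)
--     lo, hi = 0, len(prefix)
--     while lo < hi:
--         mid = (lo + hi) // 2
--         if maxtextlen < prefix[mid]:
--             hi = mid
--         else:
--             lo = mid + 1
--     return text[:lo]
-- ===== Notes on version B (the rewrite author's own statement) =====
-- stated objective: alternative
-- what changed: Replaces A's early-exit scan with a running cost by a precomputed prefix-sum cost table followed by a binary search (bisect_right by hand) for the first prefix exceeding maxtextlen.
import Mathlib
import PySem

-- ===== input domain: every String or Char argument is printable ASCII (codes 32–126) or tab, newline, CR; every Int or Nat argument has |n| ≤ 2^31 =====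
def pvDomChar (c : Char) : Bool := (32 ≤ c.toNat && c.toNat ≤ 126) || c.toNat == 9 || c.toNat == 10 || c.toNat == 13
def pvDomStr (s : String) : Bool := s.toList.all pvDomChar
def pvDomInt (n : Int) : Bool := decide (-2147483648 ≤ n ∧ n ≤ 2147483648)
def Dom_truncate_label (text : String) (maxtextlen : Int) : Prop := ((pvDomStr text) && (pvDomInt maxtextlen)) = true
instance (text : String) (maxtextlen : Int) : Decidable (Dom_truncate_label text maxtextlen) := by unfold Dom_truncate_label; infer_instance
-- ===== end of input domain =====

-- B replaces A's early-exit scan by a prefix-sum cost table plus a binary search (objective: alternative).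

-- ===== PORT A =====
-- the for-loop of A: cost accumulator, early return text[:i] when cost exceeds maxtextlen
-- (fuel = cs.length - i bounds the loop; it only makes the recursion structural)
def tlGoA (cs : List Char) (m : Int) : Nat → Int → Nat → String
  | 0, _, _ => String.mk cs
  | fuel + 1, cost, i =>
    if i < cs.length then
      let cost' := if 0 < i ∧ cs[i - 1]! == cs[i]! then cost + 2 else cost + 1
      if m < cost' then String.mk (cs.take i) else tlGoA cs m fuel cost' (i + 1)
    else String.mk cs

def truncate_label (text : String) (maxtextlen : Int) : String :=
  tlGoA text.toList maxtextlen text.toList.length 0 0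

-- ===== PORT B =====
-- Source B's first loop: build the running prefix-sum list of per-character CTC costs
def tlPfx (cs : List Char) : Nat → Int → Nat → List Int
  | 0, _, _ => []
  | fuel + 1, total, i =>
    if i < cs.length then
      let t := total + (if i == 0 ∨ ¬(cs[i - 1]! == cs[i]!) then 1 else 2)
      t :: tlPfx cs fuel t (i + 1)
    else []

-- Source B's while-loop: hand-written bisect_right (fuel = hi - lo bounds the loop)
def tlBis (a : List Int) (x : Int) : Nat → Nat → Nat → Nat
  | 0, lo, _ => lo
  | fuel + 1, lo, hi =>
    if lo < hi then
      let mid := (lo + hi) / 2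
      if x < a[mid]! then tlBis a x fuel lo mid else tlBis a x fuel (mid + 1) hi
    else lo

def truncate_label_alt (text : String) (maxtextlen : Int) : String :=
  let cs := text.toList
  let pfx := tlPfx cs cs.length 0 0
  let idx := tlBis pfx maxtextlen pfx.length 0 pfx.length
  String.mk (cs.take idx)

-- ===== PRECONDITION & SPEC =====
def Spec_truncate_label (text : String) (maxtextlen : Int) (out : String) : Prop := out = truncate_label_alt text maxtextlen
instance (text : String) (maxtextlen : Int) (out : String) : Decidable (Spec_truncate_label text maxtextlen out) := by unfold Spec_truncate_label; infer_instance

-- ===== CLAIM (what is proved, stated in full; the proofs are below) =====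
def Claim_equal_truncate_label : Prop := ∀ (text : String) (maxtextlen : Int), Dom_truncate_label text maxtextlen → Spec_truncate_label text maxtextlen (truncate_label text maxtextlen)

-- ===== LEMMAS AND PROOFS =====

-- per-character cost as A computes it
def tlF (cs : List Char) (i : Nat) : Int := if 0 < i ∧ cs[i - 1]! == cs[i]! then 2 else 1

-- cost of the first j characters
def tlP (cs : List Char) (j : Nat) : Int := ((List.range j).map (tlF cs)).sum

theorem tlP_zero (cs : List Char) : tlP cs 0 = 0 := by simp [tlP]

theorem tlP_succ (cs : List Char) (j : Nat) : tlP cs (j + 1) = tlP cs j + tlF cs j := by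
  simp [tlP, List.range_succ]

theorem tlF_ge_one (cs : List Char) (i : Nat) : 1 ≤ tlF cs i := by
  unfold tlF; split <;> norm_num

theorem tlP_strictMono (cs : List Char) : StrictMono (tlP cs) := by
  apply strictMono_nat_of_lt_succ
  intro n
  have := tlF_ge_one cs n
  rw [tlP_succ]; omega

-- B's step adds exactly tlF
theorem tlStep_eq (cs : List Char) (i : Nat) :
    (if i == 0 ∨ ¬(cs[i - 1]! == cs[i]!) then (1 : Int) else 2) = tlF cs i := by
  unfold tlF
  rcases Nat.eq_zero_or_pos i with h0 | h0
  · subst h0; simp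
  · have h0' : (i == 0) = false := by simp; omega
    by_cases hb : cs[i - 1]! = cs[i]!
    · rw [if_neg (by simp [h0', hb]), if_pos ⟨h0, by simp [hb]⟩]
    · rw [if_pos (Or.inr (by simpa using hb)), if_neg (by simp only [not_and]; intro _; simpa using hb)]

theorem tlPfx_get? (cs : List Char) (fuel : Nat) :
    ∀ i j, cs.length - i ≤ fuel →
      (tlPfx cs fuel (tlP cs i) i)[j]? = if i + j < cs.length then some (tlP cs (i + j + 1)) else none := by
  induction fuel with
  | zero =>
    intro i j hf
    simp only [tlPfx, List.getElem?_nil]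
    rw [if_neg (by omega)]
  | succ fuel ih =>
    intro i j hf
    simp only [tlPfx]
    by_cases h : i < cs.length
    · rw [if_pos h]
      simp only [tlStep_eq, ← tlP_succ]
      cases j with
      | zero => simp [h]
      | succ j' =>
        have := ih (i + 1) j' (by omega)
        simp only [List.getElem?_cons_succ, this]
        rw [show i + 1 + j' = i + (j' + 1) from by omega]
    · rw [if_neg h]
      simp only [List.getElem?_nil]
      rw [if_neg (by omega)]

theorem tlPfx_length (cs : List Char) (fuel : Nat) :
    ∀ i t, cs.length - i ≤ fuel → (tlPfx cs fuel t i).length = cs.length - i := by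
  induction fuel with
  | zero => intro i t hf; simp only [tlPfx, List.length_nil]; omega
  | succ fuel ih =>
    intro i t hf
    simp only [tlPfx]
    by_cases h : i < cs.length
    · rw [if_pos h]
      simp only [List.length_cons, ih (i + 1) _ (by omega)]
      omega
    · rw [if_neg h]; simp only [List.length_nil]; omega

theorem tlBis_spec (a : List Int) (x : Int)
    (mono : ∀ i j, i ≤ j → j < a.length → a[i]! ≤ a[j]!) (fuel : Nat) :
    ∀ lo hi, hi - lo ≤ fuel → lo ≤ hi → hi ≤ a.length →
      (∀ i, i < lo → a[i]! ≤ x) → (∀ i, hi ≤ i → i < a.length → x < a[i]!) →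
      tlBis a x fuel lo hi ≤ a.length ∧
      (∀ i, i < tlBis a x fuel lo hi → a[i]! ≤ x) ∧
      (∀ i, tlBis a x fuel lo hi ≤ i → i < a.length → x < a[i]!) := by
  induction fuel with
  | zero =>
    intro lo hi hf hlh hh hlo hhi
    have : lo = hi := by omega
    simp only [tlBis]
    exact ⟨by omega, hlo, by rw [this]; exact hhi⟩
  | succ fuel ih =>
    intro lo hi hf hlh hh hlo hhi
    simp only [tlBis]
    by_cases hlt : lo < hi
    · rw [if_pos hlt]
      have hmid : (lo + hi) / 2 < a.length := by omega
      by_cases hx : x < a[(lo + hi) / 2]!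
      · rw [if_pos hx]
        exact ih lo ((lo + hi) / 2) (by omega) (by omega) (by omega) hlo
          (fun i h1 h2 => lt_of_lt_of_le hx (mono _ i h1 h2))
      · rw [if_neg hx]
        refine ih ((lo + hi) / 2 + 1) hi (by omega) (by omega) hh ?_ hhi
        intro i h1
        have h2 : a[i]! ≤ a[(lo + hi) / 2]! := mono i _ (by omega) hmid
        omega
    · rw [if_neg hlt]
      have : lo = hi := by omega
      exact ⟨by omega, hlo, by rw [this]; exact hhi⟩

theorem tlGoA_eq (cs : List Char) (m : Int) (k : Nat) (hk : k ≤ cs.length)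
    (h1 : ∀ j, j < k → tlP cs (j + 1) ≤ m) (h2 : k < cs.length → m < tlP cs (k + 1))
    (fuel : Nat) :
    ∀ i, cs.length - i ≤ fuel → i ≤ k → tlGoA cs m fuel (tlP cs i) i = String.mk (cs.take k) := by
  induction fuel with
  | zero =>
    intro i hf hi
    have hkl : k = cs.length := by omega
    simp only [tlGoA]
    rw [hkl, List.take_length]
  | succ fuel ih =>
    intro i hf hi
    simp only [tlGoA]
    by_cases h : i < cs.length
    · rw [if_pos h]
      have hstep : (if 0 < i ∧ cs[i - 1]! == cs[i]! then tlP cs i + 2 else tlP cs i + 1)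
          = tlP cs (i + 1) := by
        rw [tlP_succ]; unfold tlF; split <;> simp
      simp only [hstep]
      by_cases hm : m < tlP cs (i + 1)
      · rw [if_pos hm]
        have : i = k := by
          by_contra hne
          exact absurd (h1 i (by omega)) (by omega)
        rw [this]
      · rw [if_neg hm]
        have : i + 1 ≤ k := by
          by_contra hne
          have hik : i = k := by omega
          exact hm (hik ▸ h2 (hik ▸ h))
        exact ih (i + 1) (by omega) this
    · rw [if_neg h]
      have hkl : k = cs.length := by omega
      rw [hkl, List.take_length]

-- ===== VERDICT (by name: the statement is the Claim_ definition above) =====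
theorem truncate_label_spec : Claim_equal_truncate_label := by
  intro text m _
  unfold Spec_truncate_label truncate_label truncate_label_alt
  simp only []
  set cs := text.toList with hcs
  set a := tlPfx cs cs.length 0 0 with ha
  have hlen : a.length = cs.length := by
    rw [ha, tlPfx_length cs cs.length 0 0 (by omega)]; omega
  have hget : ∀ j, j < cs.length → a[j]! = tlP cs (j + 1) := by
    intro j hj
    have h? : a[j]? = some (tlP cs (j + 1)) := by
      rw [ha, ← tlP_zero cs, tlPfx_get? cs cs.length 0 j (by omega)]
      simp [hj]
    have hj' : j < a.length := by omega
    rw [getElem!_pos a j hj']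
    rw [List.getElem?_eq_getElem hj'] at h?
    exact Option.some.inj h?
  have mono : ∀ i j, i ≤ j → j < a.length → a[i]! ≤ a[j]! := by
    intro i j hij hj
    rw [hget i (by omega), hget j (by omega)]
    exact (tlP_strictMono cs).monotone (by omega)
  obtain ⟨hkle, hbelow, habove⟩ :=
    tlBis_spec a m mono a.length 0 a.length (by omega) (by omega) le_rfl
      (by omega) (by intro i h1 h2; omega)
  set k := tlBis a m a.length 0 a.length with hk
  have h1 : ∀ j, j < k → tlP cs (j + 1) ≤ m := by
    intro j hj
    rw [← hget j (by omega)]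
    exact hbelow j hj
  have h2 : k < cs.length → m < tlP cs (k + 1) := by
    intro hkn
    rw [← hget k hkn]
    exact habove k le_rfl (by omega)
  have := tlGoA_eq cs m k (by omega) h1 h2 cs.length 0 (by omega) (Nat.zero_le k)
  rw [tlP_zero] at this
  exact this
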